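-- pv_equiv track=rewrite | github.com/shivam-jha2712/codechef | .vscode/July contest/Chef_vs_Bharat.py | createoddplain
-- ===== SOURCE A (Python) =====
-- def createoddplain(inp):
--     n=inp
--     palin = inp
--     n=n//10
--     while n>0:
--         palin=palin*10+(n%10)
--         n=n//10
--     return palin;
-- ===== SOURCE B (Python) =====
-- def createoddplain(inp):
--     # Builds the odd-length palindrome as a digit string (mirror all but the
--     # last digit) and evaluates it, instead of peeling digits arithmetically.
--     if inp < 10:
--         return inp
--     s = str(inp)
--     pal = 0
--     for ch in s + s[:-1][::-1]:
--         pal = 10 * pal + (ord(ch) - 48)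
--     return pal
-- ===== Notes on version B (the rewrite author's own statement) =====
-- stated objective: alternative
-- what changed: B builds the palindromic decimal string directly (str(inp) plus the reverse of all but its last character via slicing) and evaluates the digit characters left-to-right, instead of A's while-loop that peels digits off inp//10 with mod/div and grafts them onto an arithmetic accumulator.
import Mathlib
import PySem

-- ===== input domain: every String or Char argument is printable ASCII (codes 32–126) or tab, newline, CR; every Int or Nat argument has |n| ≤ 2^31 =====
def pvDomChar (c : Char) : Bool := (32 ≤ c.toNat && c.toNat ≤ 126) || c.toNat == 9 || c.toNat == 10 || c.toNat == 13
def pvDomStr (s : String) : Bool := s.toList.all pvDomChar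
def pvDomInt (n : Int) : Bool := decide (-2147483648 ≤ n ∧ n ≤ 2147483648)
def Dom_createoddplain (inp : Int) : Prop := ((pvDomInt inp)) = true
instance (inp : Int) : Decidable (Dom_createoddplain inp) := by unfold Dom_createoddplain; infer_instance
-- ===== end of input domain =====

-- B builds the palindromic digit string (decimal string plus the reverse of all but its
-- last character) and evaluates it left-to-right, instead of A's arithmetic digit-peeling loop.


-- ===== PORT A =====
-- 'while n > 0: palin = palin*10 + n%10; n = n//10'
def createoddplainLoop (palin n : Int) : Int :=
  if h : n > 0 then
    createoddplainLoop (palin * 10 + PySem.Int.mod n 10) (PySem.Int.floordiv n 10)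
  else palin
termination_by n.toNat
decreasing_by
  simp only [PySem.Int.floordiv_eq_ediv_of_pos (by norm_num : (0:Int) < 10)]
  omega

def createoddplain (inp : Int) : Int :=
  createoddplainLoop inp (PySem.Int.floordiv inp 10)

-- ===== PORT B =====
-- strings are ported on the List Char side (PySem.Int.toChars = str(inp).toList)
def createoddplain_alt (inp : Int) : Int :=
  if inp < 10 then inp
  else
    let s := PySem.Int.toChars inp
    -- s[:-1][::-1]
    let t := (PySem.List.slice? (PySem.List.slice s none (some (-1))) none none (-1)).getD []
    -- for ch in s + t: pal = 10*pal + (ord(ch) - 48)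
    (s ++ t).foldl (fun pal c => 10 * pal + ((c.toNat : Int) - 48)) 0

-- ===== PRECONDITION & SPEC =====
def Spec_createoddplain (inp : Int) (out : Int) : Prop := out = createoddplain_alt inp
instance (inp : Int) (out : Int) : Decidable (Spec_createoddplain inp out) := by unfold Spec_createoddplain; infer_instance

-- ===== CLAIM (what is proved, stated in full; the proofs are below) =====
def Claim_equal_createoddplain : Prop := ∀ (inp : Int), Dom_createoddplain inp → Spec_createoddplain inp (createoddplain inp)

-- ===== LEMMAS AND PROOFS =====

-- ord(digitChar m) - 48 recovers the digit
theorem digitChar_toNat_int (m : Nat) (h : m < 10) :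
    ((Nat.digitChar m).toNat : Int) = 48 + m := by
  interval_cases m <;> decide

-- Horner evaluation of the decimal digit characters of m, from any accumulator p
theorem foldl_toDigits (m : Nat) : ∀ p : Int,
    (Nat.toDigits 10 m).foldl (fun pal c => 10 * pal + ((c.toNat : Int) - 48)) p
      = p * 10 ^ (Nat.toDigits 10 m).length + m := by
  induction m using Nat.strong_induction_on with
  | _ m ih =>
    intro p
    by_cases hlt : m < 10
    · rw [Nat.toDigits_of_lt_base hlt]
      simp [List.foldl, digitChar_toNat_int m hlt]
      ring
    · have h10 : 10 ≤ m := by omega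
      rw [Nat.toDigits_of_base_le (by norm_num) h10]
      rw [List.foldl_append, List.length_append]
      rw [ih (m / 10) (by omega) p]
      have hmod : m % 10 < 10 := by omega
      simp only [List.foldl, digitChar_toNat_int (m % 10) hmod, List.length_cons,
        List.length_nil]
      have hdm : (10 : Int) * ((m / 10 : Nat) : Int) + ((m % 10 : Nat) : Int) = (m : Int) := by
        exact_mod_cast Nat.div_add_mod m 10
      have : (10:Int) * (p * 10 ^ (Nat.toDigits 10 (m / 10)).length + ((m / 10 : Nat) : Int))
            + (48 + ((m % 10 : Nat) : Int) - 48)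
          = p * 10 ^ ((Nat.toDigits 10 (m / 10)).length + (0 + 1))
            + ((10 : Int) * ((m / 10 : Nat) : Int) + ((m % 10 : Nat) : Int)) := by ring
      rw [this, hdm]

-- A's while loop consumes the digits of k least-significant first, i.e. it is a left fold
-- over the REVERSED decimal string of k
theorem createoddplainLoop_eq (k : Nat) : 0 < k → ∀ p : Int,
    createoddplainLoop p (k : Int)
      = ((Nat.toDigits 10 k).reverse).foldl (fun pal c => 10 * pal + ((c.toNat : Int) - 48)) p := by
  induction k using Nat.strong_induction_on with
  | _ k ih =>
    intro hk p
    rw [createoddplainLoop]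
    rw [dif_pos (by exact_mod_cast hk)]
    have hmodk : PySem.Int.mod (k : Int) 10 = ((k % 10 : Nat) : Int) := by
      exact_mod_cast PySem.Int.mod_natCast k 10
    have hdivk : PySem.Int.floordiv (k : Int) 10 = ((k / 10 : Nat) : Int) := by
      exact_mod_cast PySem.Int.floordiv_natCast k 10
    rw [hmodk, hdivk]
    by_cases hlt : k < 10
    · have h0 : k / 10 = 0 := Nat.div_eq_of_lt hlt
      have hk10 : k % 10 = k := Nat.mod_eq_of_lt hlt
      rw [h0, hk10]
      rw [createoddplainLoop, dif_neg (by norm_num)]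
      rw [Nat.toDigits_of_lt_base hlt]
      simp [List.foldl, digitChar_toNat_int k hlt]
      ring
    · have h10 : 10 ≤ k := by omega
      rw [Nat.toDigits_of_base_le (by norm_num) h10]
      rw [List.reverse_append, List.reverse_singleton, List.singleton_append]
      rw [List.foldl_cons]
      rw [ih (k / 10) (by omega) (by omega)]
      have hmod : k % 10 < 10 := by omega
      rw [digitChar_toNat_int (k % 10) hmod]
      ring_nf

-- dropping the last decimal digit character is dividing by ten
theorem toDigits_dropLast (m : Nat) (h : 10 ≤ m) :
    (Nat.toDigits 10 m).dropLast = Nat.toDigits 10 (m / 10) := by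
  rw [Nat.toDigits_of_base_le (by norm_num) h]
  exact List.dropLast_concat

theorem createoddplain_eq_alt (inp : Int) :
    createoddplain inp = createoddplain_alt inp := by
  by_cases hlt : inp < 10
  · -- the loop never runs: inp // 10 ≤ 0
    have hdiv : ¬ PySem.Int.floordiv inp 10 > 0 := by
      rw [PySem.Int.floordiv_eq_ediv_of_pos (by norm_num : (0:Int) < 10)]
      omega
    rw [createoddplain, createoddplainLoop, dif_neg hdiv, createoddplain_alt, if_pos hlt]
  · -- inp ≥ 10
    push Not at hlt
    set m : Nat := inp.toNat with hmdef
    have hm : (m : Int) = inp := Int.toNat_of_nonneg (by omega)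
    have hm10 : 10 ≤ m := by omega
    have hdpos : 0 < m / 10 := Nat.div_pos hm10 (by norm_num)
    -- A's side
    have hA : createoddplain inp
        = ((Nat.toDigits 10 (m / 10)).reverse).foldl
            (fun pal c => 10 * pal + ((c.toNat : Int) - 48)) inp := by
      have hdivm : PySem.Int.floordiv (m : Int) 10 = ((m / 10 : Nat) : Int) := by
        exact_mod_cast PySem.Int.floordiv_natCast m 10
      rw [createoddplain, ← hm, hdivm]
      rw [createoddplainLoop_eq (m / 10) hdpos, hm]
    -- B's side
    have hs : PySem.Int.toChars inp = Nat.toDigits 10 m := by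
      rw [PySem.Int.toChars, if_neg (by omega)]
    rw [hA, createoddplain_alt, if_neg (by omega)]
    simp only [hs, PySem.List.slice_to_neg_one, PySem.List.slice?_none_none_neg_one,
      Option.getD_some]
    rw [toDigits_dropLast m hm10]
    rw [List.foldl_append]
    rw [foldl_toDigits m 0]
    simp [hm]

-- ===== VERDICT (by name: the statement is the Claim_ definition above) =====
theorem createoddplain_spec : Claim_equal_createoddplain := by
  intro inp _
  unfold Spec_createoddplain
  exact createoddplain_eq_alt inp
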